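-- pv_equiv track=rewrite | github.com/Public-Lands-Institute/pli-commons | cleanup_zotero.py | preferred_form
-- ===== SOURCE A (Python) =====
-- def preferred_form(variants: list[str]) -> str:
--     """Pick the best capitalization: prefer Title Case, then most common."""
--     title_cased = [v for v in variants if v == v.title()]
--     if title_cased:
--         return title_cased[0]
--     lower = [v for v in variants if v == v.lower()]
--     if lower:
--         return lower[0]
--     return variants[0]
-- ===== SOURCE B (Python) =====
-- def preferred_form(variants: list[str]) -> str:
--     """Pick the best capitalization: prefer Title Case, then most common."""
--     first_lower = None
--     for v in variants:
--         if v == v.title():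
--             return v
--         if first_lower is None and v == v.lower():
--             first_lower = v
--     if first_lower is not None:
--         return first_lower
--     return variants[0]
-- ===== Notes on version B (the rewrite author's own statement) =====
-- stated objective: alternative
-- what changed: Replaces the two list comprehensions (two full scans building lists) with one early-exiting pass that returns the first title-cased variant immediately and remembers the first lowercase variant in an accumulator.
-- outside the precondition, e.g. on preferred_form([]): A raises IndexError, B raises IndexError
import Mathlib
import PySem

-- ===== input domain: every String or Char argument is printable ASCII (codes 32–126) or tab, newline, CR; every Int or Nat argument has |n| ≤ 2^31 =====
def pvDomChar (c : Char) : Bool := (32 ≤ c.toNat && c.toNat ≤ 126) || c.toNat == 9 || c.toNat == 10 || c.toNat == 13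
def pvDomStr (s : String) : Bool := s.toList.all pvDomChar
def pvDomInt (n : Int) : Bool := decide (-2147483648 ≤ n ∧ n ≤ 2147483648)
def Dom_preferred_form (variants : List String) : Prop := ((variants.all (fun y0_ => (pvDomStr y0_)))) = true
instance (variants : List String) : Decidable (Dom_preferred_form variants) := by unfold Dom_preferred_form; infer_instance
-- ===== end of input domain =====

-- B replaces A's two filtering passes by one early-exiting traversal with a 'first lowercase' accumulator
-- (alternative decomposition, same cost); equivalence is about the return value only.

-- str.title() ported by hand (exact on ASCII: a letter after a non-letter is uppercased, other letters lowercased)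
def pyTitleChars : List Char → Bool → List Char
  | [], _ => []
  | c :: cs, prevAlpha =>
    (if PySem.Chars.isalpha c then
        (if prevAlpha then PySem.Chars.lowerChar c else PySem.Chars.upperChar c)
      else c) :: pyTitleChars cs (PySem.Chars.isalpha c)

def pyTitle (s : String) : String := String.mk (pyTitleChars s.toList false)

def isTitleCased (v : String) : Bool := v == pyTitle v
def isLowerCased (v : String) : Bool := v == PySem.Str.lower v

-- ===== PORT A =====
def preferred_form (variants : List String) : String :=
  let title_cased := variants.filter (fun v => isTitleCased v)
  if title_cased ≠ [] then title_cased.headD ""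
  else
    let lower := variants.filter (fun v => isLowerCased v)
    if lower ≠ [] then lower.headD ""
    else ((PySem.List.pyGet? variants 0).getD "")   -- variants[0]; none (IndexError) excluded by Pre_

-- ===== PORT B =====
def altLoop : List String → Option String → Option String
  | [], firstLower => firstLower
  | v :: rest, firstLower =>
    if isTitleCased v then some v
    else altLoop rest (if firstLower.isNone && isLowerCased v then some v else firstLower)

def preferred_form_alt (variants : List String) : String :=
  match altLoop variants none with
  | some s => s
  | none => ((PySem.List.pyGet? variants 0).getD "")

-- ===== PRECONDITION & SPEC =====
-- Pre_ excludes the empty list, on which A (and B) raise IndexError at variants[0].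
def Pre_preferred_form (variants : List String) : Prop := variants ≠ []
instance (variants : List String) : Decidable (Pre_preferred_form variants) := by unfold Pre_preferred_form; infer_instance
def pvWitness_preferred_form : List String := (["Ab", "cd"])
def Spec_preferred_form (variants : List String) (out : String) : Prop := out = preferred_form_alt variants
instance (variants : List String) (out : String) : Decidable (Spec_preferred_form variants out) := by unfold Spec_preferred_form; infer_instance

-- ===== CLAIM (what is proved, stated in full; the proofs are below) =====
def Claim_equal_preferred_form : Prop := ∀ (variants : List String), Dom_preferred_form variants → Pre_preferred_form variants → Spec_preferred_form variants (preferred_form variants)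

-- ===== LEMMAS AND PROOFS =====

lemma altLoop_eq (xs : List String) (low : Option String) :
    altLoop xs low =
      ((xs.find? (fun v => isTitleCased v)).orElse
        (fun _ => low.orElse (fun _ => xs.find? (fun v => isLowerCased v)))) := by
  induction xs generalizing low with
  | nil => simp [altLoop]
  | cons v rest ih =>
    by_cases ht : isTitleCased v
    · simp [altLoop, List.find?, ht]
    · cases low with
      | none =>
        by_cases hl : isLowerCased v
        · simp [altLoop, List.find?, ht, hl, ih, Option.orElse]
        · simp [altLoop, List.find?, ht, hl, ih]
      | some s =>
        simp [altLoop, List.find?, ht, ih, Option.orElse]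

lemma filter_eq_nil_iff_find?_none {α : Type} (p : α → Bool) (xs : List α) :
    xs.filter p = [] ↔ xs.find? p = none := by
  simp [List.filter_eq_nil_iff, List.find?_eq_none]

-- ===== VERDICT (by name: the statement is the Claim_ definition above) =====
theorem preferred_form_spec : Claim_equal_preferred_form := by
  intro variants _ _
  unfold Spec_preferred_form preferred_form preferred_form_alt
  rw [altLoop_eq]
  by_cases hT : variants.filter (fun v => isTitleCased v) = []
  · have hTf : variants.find? (fun v => isTitleCased v) = none :=
      (filter_eq_nil_iff_find?_none _ _).mp hT
    by_cases hL : variants.filter (fun v => isLowerCased v) = []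
    · have hLf : variants.find? (fun v => isLowerCased v) = none :=
        (filter_eq_nil_iff_find?_none _ _).mp hL
      simp [hT, hL, hTf, hLf, Option.orElse]
    · rcases hfind : variants.find? (fun v => isLowerCased v) with _ | s
      · exact absurd ((filter_eq_nil_iff_find?_none _ _).mpr hfind) hL
      · simp [hT, hL, hTf, hfind, Option.orElse]
  · rcases hfind : variants.find? (fun v => isTitleCased v) with _ | t
    · exact absurd ((filter_eq_nil_iff_find?_none _ _).mpr hfind) hT
    · simp [hT, hfind, Option.orElse]
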